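/- GENERATED by farm/mkstatement.py from design/units.tsv (unit `decode_residue.8`) and the assertions of Vorbis/Spec/DecodeResidue.lean — do not edit.
   THE STATEMENT of the proof unit `decode_residue.8`: segment 8 of `decode_residue` (56 instructions; entries 0x10eea8,0x10f8f8,0x10fa8d;
   exits 0x10f7a5,0x10f914,0x10fafc; ranges 0x10eea8-0x10ef03 + 0x10f8d5-0x10f90c + 0x10fa8d-0x10faf7)
   takes each of its entry assertions to one of its exit assertions (`Vorbis.Spec.DecodeResidue.Seg8`), given the contracts of its callees.
   What the names mean: Vorbis/Spec/Basic.lean (the shared hypotheses), Vorbis/Spec/DecodeResidue.lean (the assertions). The theorem to prove: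
   `theorem decode_residue_8_ok : Vorbis.Spec.decode_residue_8.Statement`. -/
import Vorbis.Spec.DecodeResidue
namespace Vorbis.Spec.decode_residue_8
open X86 X86.User Asan

/-- The statement of unit `decode_residue.8`. -/
def Statement : Prop :=
  ∀ (Lay : Layout) (_hLay : Lay.hi = 0x1000000) (μ : Microarch) (_hμ : UserX.MicroOK μ) (u₀ : State)
    (_hcode : HasCodeNat Lay u₀ Vorbis.L.decode_residue.entry Vorbis.Code.code_decode_residue.nat Vorbis.L.decode_residue.size),
    Vorbis.Spec.DecodeResidue.Seg8 Lay μ u₀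

end Vorbis.Spec.decode_residue_8
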